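-- pv_equiv track=rewrite | github.com/rogerramosruiz/python-android-control | control/read_event.py | get_event_name
-- ===== SOURCE A (Python) =====
-- def get_event_name(getevent_output:str):
--     lines = getevent_output.splitlines()
--     current_event = ''
--     for line in lines:
--         if 'add device' in line:
--             current_event = line.split(':')[-1].split('/')[-1]
--         if 'INPUT_PROP_DIRECT' in line:
--             return current_event
--     return None
-- ===== SOURCE B (Python) =====
-- def get_event_name(getevent_output: str):
--     lines = getevent_output.splitlines()
--     marker = None
--     for i, line in enumerate(lines):
--         if 'INPUT_PROP_DIRECT' in line:
--             marker = i
--             break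
--     if marker is None:
--         return None
--     for j in range(marker, -1, -1):
--         if 'add device' in lines[j]:
--             return lines[j].split(':')[-1].split('/')[-1]
--     return ''
-- ===== Notes on version B (the rewrite author's own statement) =====
-- stated objective: alternative
-- what changed: Replaces the forward accumulate-with-state scan by locating the first INPUT_PROP_DIRECT line and then searching backward from it (inclusive) for the nearest 'add device' line; no running accumulator is kept.
import Mathlib
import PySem

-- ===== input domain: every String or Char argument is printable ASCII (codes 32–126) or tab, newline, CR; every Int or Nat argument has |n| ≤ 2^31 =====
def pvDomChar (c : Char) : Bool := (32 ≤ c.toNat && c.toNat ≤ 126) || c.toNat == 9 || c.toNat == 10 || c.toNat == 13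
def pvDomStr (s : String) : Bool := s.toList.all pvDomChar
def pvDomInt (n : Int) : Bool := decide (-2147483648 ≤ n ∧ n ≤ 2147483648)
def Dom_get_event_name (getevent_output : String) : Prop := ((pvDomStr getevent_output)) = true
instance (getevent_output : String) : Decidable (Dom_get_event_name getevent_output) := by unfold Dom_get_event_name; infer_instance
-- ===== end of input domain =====

-- B replaces A's forward scan with a running accumulator by finding the first
-- INPUT_PROP_DIRECT line and searching backward from it for the nearest 'add device' line
-- (alternative decomposition; same O(n) cost; return value only, no side effects involved).

-- ===== PORT A =====
-- line.split(':')[-1].split('/')[-1] (A's inline expression)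
def pvExtractA (line : String) : String :=
  let p1 := ((PySem.Str.split? line ":").getD []).getLastD ""
  ((PySem.Str.split? p1 "/").getD []).getLastD ""

-- the for-loop over lines with the mutable accumulator current_event
def pvLoopA : List String → String → Option String
  | [], _ => none
  | l :: ls, cur =>
    let cur' := if PySem.Str.isIn "add device" l then pvExtractA l else cur
    if PySem.Str.isIn "INPUT_PROP_DIRECT" l then some cur' else pvLoopA ls cur'

def get_event_name (getevent_output : String) : Option String :=
  pvLoopA (PySem.Str.splitlines getevent_output) ""

-- ===== PORT B =====
-- lines[j].split(':')[-1].split('/')[-1] (B's return expression)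
def pvExtractB (line : String) : String :=
  let p1 := ((PySem.Str.split? line ":").getD []).getLastD ""
  ((PySem.Str.split? p1 "/").getD []).getLastD ""

def get_event_name_alt (getevent_output : String) : Option String :=
  let lines := PySem.Str.splitlines getevent_output
  match lines.findIdx? (fun l => PySem.Str.isIn "INPUT_PROP_DIRECT" l) with
  | none => none
  | some i =>
    -- for j in range(marker, -1, -1): scan lines[0..marker] back to front
    match ((lines.take (i + 1)).reverse).find? (fun l => PySem.Str.isIn "add device" l) with
    | some l => some (pvExtractB l)
    | none => some ""

-- ===== PRECONDITION & SPEC =====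
def Spec_get_event_name (getevent_output : String) (out : Option String) : Prop := out = get_event_name_alt getevent_output
instance (getevent_output : String) (out : Option String) : Decidable (Spec_get_event_name getevent_output out) := by unfold Spec_get_event_name; infer_instance

-- ===== CLAIM (what is proved, stated in full; the proofs are below) =====
def Claim_equal_get_event_name : Prop := ∀ (getevent_output : String), Dom_get_event_name getevent_output → Spec_get_event_name getevent_output (get_event_name getevent_output)

-- ===== LEMMAS AND PROOFS =====

-- characterisation of A's loop: it is B's marker-then-backward-search with `cur` as default
theorem pvLoopA_eq (ls : List String) : ∀ cur : String,
    pvLoopA ls cur =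
      match ls.findIdx? (fun l => PySem.Str.isIn "INPUT_PROP_DIRECT" l) with
      | none => none
      | some i =>
        some (((((ls.take (i + 1)).reverse).find?
            (fun l => PySem.Str.isIn "add device" l)).map pvExtractA).getD cur) := by
  induction ls with
  | nil => intro cur; rfl
  | cons l ls ih =>
    intro cur
    rw [pvLoopA, List.findIdx?_cons]
    by_cases hm : PySem.Str.isIn "INPUT_PROP_DIRECT" l = true
    · simp only [hm, if_true]
      simp [List.take, List.find?]
      all_goals (split_ifs <;> rfl)
    · simp only [hm, if_false, Bool.false_eq_true, if_neg, not_false_iff]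
      rw [ih]
      cases hfi : ls.findIdx? (fun l => PySem.Str.isIn "INPUT_PROP_DIRECT" l) with
      | none => simp
      | some i =>
        simp only [Option.map_some, Nat.succ_eq_add_one]
        have htake : (l :: ls).take (i + 1 + 1) = l :: ls.take (i + 1) := rfl
        rw [htake]
        simp only [List.reverse_cons, List.find?_append]
        cases hf : ((ls.take (i + 1)).reverse).find? (fun l => PySem.Str.isIn "add device" l) with
        | some x => simp [hf]
        | none =>
          by_cases ha : PySem.Chars.isIn
              ['a','d','d',' ','d','e','v','i','c','e'] l.toList = true <;>
            simp [List.find?, ha]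

-- ===== VERDICT (by name: the statement is the Claim_ definition above) =====
theorem get_event_name_spec : Claim_equal_get_event_name := by
  intro s _
  unfold Spec_get_event_name get_event_name get_event_name_alt
  rw [pvLoopA_eq]
  cases h : (PySem.Str.splitlines s).findIdx? (fun l => PySem.Str.isIn "INPUT_PROP_DIRECT" l) with
  | none => simp only [h]
  | some i =>
    simp only [h]
    cases hf : (((PySem.Str.splitlines s).take (i + 1)).reverse).find?
        (fun l => PySem.Str.isIn "add device" l) with
    | none => simp only [hf, Option.map_none, Option.getD_none]
    | some x => simp only [hf, Option.map_some, Option.getD_some]; rfl
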